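-- pv_equiv track=rewrite | github.com/jon-esperanza/advent_of_code | advent_of_code/2024/1.py | part_two
-- ===== SOURCE A (Python) =====
-- def part_two(left_ids, right_ids):
--     """
--     Count how often each id from left_ids appears in right_ids
--     Multiply each id on the left_ids by the number of times it appears in right_ids
--     """
--     frequencies = {}  # Switch to hashmap data structure for kv store
--     for id in left_ids:
--         if id not in frequencies:
--             frequencies[id] = 0
--
--     for id in right_ids:
--         if id in frequencies:
--             frequencies[id] += 1
--
--     similarity_scores = [id * cnt for id, cnt in frequencies.items()]
--     return sum(similarity_scores)  # 27267728
-- ===== SOURCE B (Python) =====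
-- def part_two(left_ids, right_ids):
--     wanted = set(left_ids)
--     return sum(r for r in right_ids if r in wanted)
-- ===== Notes on version B (the rewrite author's own statement) =====
-- stated objective: simpler
-- what changed: B builds no frequency table at all: since each right-list occurrence of a wanted id contributes that id once to the total, B reverses the summation and sums the right-list elements that belong to set(left_ids) in one filtered pass, instead of A's seed-left-dict, count-right, multiply-and-sum pipeline.
import Mathlib
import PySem

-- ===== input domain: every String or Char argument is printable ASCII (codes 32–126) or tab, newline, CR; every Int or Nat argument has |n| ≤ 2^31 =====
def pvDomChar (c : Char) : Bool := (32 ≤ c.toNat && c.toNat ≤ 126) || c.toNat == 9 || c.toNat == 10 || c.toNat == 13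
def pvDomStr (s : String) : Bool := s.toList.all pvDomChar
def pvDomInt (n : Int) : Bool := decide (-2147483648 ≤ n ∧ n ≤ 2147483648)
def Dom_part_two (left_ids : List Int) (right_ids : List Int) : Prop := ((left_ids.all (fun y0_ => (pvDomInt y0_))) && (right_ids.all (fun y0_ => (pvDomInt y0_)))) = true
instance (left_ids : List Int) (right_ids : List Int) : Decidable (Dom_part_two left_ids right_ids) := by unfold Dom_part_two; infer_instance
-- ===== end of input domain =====

-- B drops the frequency table entirely: each right occurrence of an id contributes that id once,
-- so B sums the right-list elements that lie in set(left_ids) in one filtered pass (simpler, same cost).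

-- ===== PORT A =====
-- frequencies = {}; for id in left_ids: if id not in frequencies: frequencies[id] = 0;
-- for id in right_ids: if id in frequencies: frequencies[id] += 1;
-- return sum([id * cnt for id, cnt in frequencies.items()])
def part_two (left_ids : List Int) (right_ids : List Int) : Int :=
  ((right_ids.foldl (fun d id => if d.contains id then d.insert id (d.getD id 0 + 1) else d)
      (left_ids.foldl (fun d id => if !(d.contains id) then d.insert id 0 else d)
        (PySem.Dict.empty : PySem.Dict Int Int))).items.map
    (fun p => p.1 * p.2)).sum

-- ===== PORT B =====
-- wanted = set(left_ids); return sum(r for r in right_ids if r in wanted)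
def part_two_alt (left_ids : List Int) (right_ids : List Int) : Int :=
  let wanted : PySem.Set Int := PySem.Set.ofList left_ids
  right_ids.foldl (fun acc r => if PySem.Set.contains wanted r then acc + r else acc) 0

-- ===== PRECONDITION & SPEC =====
def Spec_part_two (left_ids : List Int) (right_ids : List Int) (out : Int) : Prop := out = part_two_alt left_ids right_ids
instance (left_ids : List Int) (right_ids : List Int) (out : Int) : Decidable (Spec_part_two left_ids right_ids out) := by unfold Spec_part_two; infer_instance

-- ===== CLAIM (what is proved, stated in full; the proofs are below) =====
def Claim_equal_part_two : Prop := ∀ (left_ids : List Int) (right_ids : List Int), Dom_part_two left_ids right_ids → Spec_part_two left_ids right_ids (part_two left_ids right_ids)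

-- ===== LEMMAS AND PROOFS =====

-- Phase 1 of A (seed missing left keys with 0): keys accumulate exactly as Python's set does.
lemma p1_keys (l : List Int) (d : PySem.Dict Int Int) :
    (l.foldl (fun d id => if !(d.contains id) then d.insert id 0 else d) d).keys
      = PySem.Set.update d.keys l := by
  induction l generalizing d with
  | nil => rfl
  | cons x t ih =>
    rw [List.foldl_cons, PySem.Set.update_cons]
    by_cases h : d.contains x = true
    · have hx : x ∈ d.keys := (PySem.Dict.contains_iff_mem_keys d x).mp h
      rw [if_neg (by simp [h]), ih, PySem.Set.add_of_mem hx]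
    · have hx : x ∉ d.keys := fun hm => h ((PySem.Dict.contains_iff_mem_keys d x).mpr hm)
      rw [if_pos (by simp [h]), ih, PySem.Set.add_of_not_mem hx,
          PySem.Dict.keys_insert_of_not_contains d 0 (by simpa using h)]

-- Phase 1 never changes any getD-with-default-0 value (a fresh key gets exactly the default 0).
lemma p1_getD (l : List Int) (d : PySem.Dict Int Int) (k : Int) :
    (l.foldl (fun d id => if !(d.contains id) then d.insert id 0 else d) d).getD k 0
      = d.getD k 0 := by
  induction l generalizing d with
  | nil => rfl
  | cons x t ih =>
    rw [List.foldl_cons]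
    by_cases h : d.contains x = true
    · rw [if_neg (by simp [h])]; exact ih d
    · rw [if_pos (by simp [h]), ih, PySem.Dict.getD_insert]
      split
      · next heq => subst heq; exact (PySem.Dict.getD_of_not_contains d 0 (by simpa using h)).symm
      · rfl

-- Phase 2 of A (count right ids already present): keys are unchanged.
lemma p2_keys (r : List Int) (d : PySem.Dict Int Int) :
    (r.foldl (fun d id => if d.contains id then d.insert id (d.getD id 0 + 1) else d) d).keys
      = d.keys := by
  induction r generalizing d with
  | nil => rfl
  | cons x t ih =>
    rw [List.foldl_cons]
    by_cases h : d.contains x = true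
    · rw [if_pos h, ih, PySem.Dict.keys_insert_of_contains d _ h]
    · rw [if_neg h, ih]

-- Phase 2 adds r.count k to the value of every key k that is present.
lemma p2_getD (r : List Int) (d : PySem.Dict Int Int) (k : Int) (hk : d.contains k = true) :
    (r.foldl (fun d id => if d.contains id then d.insert id (d.getD id 0 + 1) else d) d).getD k 0
      = d.getD k 0 + r.count k := by
  induction r generalizing d with
  | nil => simp
  | cons x t ih =>
    rw [List.foldl_cons]
    by_cases h : d.contains x = true
    · have hk' : (d.insert x (d.getD x 0 + 1)).contains k = true := by
        rw [PySem.Dict.contains_insert]; simp [hk]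
      rw [if_pos h, ih _ hk', PySem.Dict.getD_insert, List.count_cons]
      by_cases hkx : k = x
      · subst hkx; simp; ring
      · simp [Ne.symm hkx, hkx]
    · have hkx : ¬ (k = x) := fun he => h (he ▸ hk)
      rw [if_neg h, ih _ hk, List.count_cons]
      simp [Ne.symm hkx]

-- The single indicator summand: over a duplicate-free list S, summing 'x if k = x' picks x once.
lemma sum_indicator (S : List Int) (x : Int) (hnd : S.Nodup) :
    (S.map (fun k => if k = x then x else 0)).sum = if x ∈ S then x else 0 := by
  induction S with
  | nil => simp
  | cons a t ih =>
    rcases List.nodup_cons.mp hnd with ⟨ha, hnt⟩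
    by_cases hax : a = x
    · subst hax
      simp [ih hnt, ha]
    · have : (x ∈ a :: t) ↔ (x ∈ t) := by
        constructor
        · intro h; rcases List.mem_cons.mp h with h | h
          · exact absurd h.symm hax
          · exact h
        · exact fun h => List.mem_cons_of_mem a h
      simp [hax, ih hnt, this]

-- Reversing the summation: Σ_{k ∈ S} k · count r k = Σ of the elements of r that lie in S (S duplicate-free).
lemma sum_count_eq_filter (S : List Int) (r : List Int) (hnd : S.Nodup) :
    (S.map (fun k => k * (r.count k : Int))).sum = (r.filter (fun x => decide (x ∈ S))).sum := by
  induction r with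
  | nil => simp
  | cons x t ih =>
    have hmap : (S.map (fun k => k * ((x :: t).count k : Int)))
        = S.map (fun k => k * (t.count k : Int) + (if k = x then x else 0)) := by
      refine List.map_congr_left (fun k _ => ?_)
      rw [List.count_cons]
      by_cases hkx : k = x
      · subst hkx; simp; ring
      · simp [Ne.symm hkx, hkx]
    by_cases hx : x ∈ S
    · rw [hmap]
      simp only [List.sum_map_add, ih, List.filter_cons, decide_eq_true_eq, sum_indicator S x hnd]
      simp [hx, add_comm]
    · rw [hmap]
      simp only [List.sum_map_add, ih, List.filter_cons, decide_eq_true_eq, sum_indicator S x hnd]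
      simp [hx]

-- B's fold is the sum of the filtered right list.
lemma foldl_if_add (p : Int → Bool) (r : List Int) (a : Int) :
    r.foldl (fun acc x => if p x then acc + x else acc) a = a + (r.filter p).sum := by
  induction r generalizing a with
  | nil => simp
  | cons x t ih =>
    rw [List.foldl_cons, List.filter_cons]
    by_cases h : p x = true
    · rw [if_pos h, ih]; simp [h, add_assoc]
    · rw [if_neg h, ih]; simp [h]

-- ===== VERDICT (by name: the statement is the Claim_ definition above) =====
theorem part_two_spec : Claim_equal_part_two := by
  intro l r _
  show part_two l r = part_two_alt l r
  unfold part_two part_two_alt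
  have hkeys1 : (l.foldl (fun d id => if !(d.contains id) then d.insert id 0 else d)
      (PySem.Dict.empty : PySem.Dict Int Int)).keys = PySem.Set.ofList l := by
    rw [p1_keys, PySem.Dict.keys_empty, PySem.Set.update_eq_foldl, ← PySem.Set.ofList_eq_foldl]
  have hnd1 : (l.foldl (fun d id => if !(d.contains id) then d.insert id 0 else d)
      (PySem.Dict.empty : PySem.Dict Int Int)).keys.Nodup := by
    rw [hkeys1]; exact PySem.Set.nodup_ofList l
  have hnd2 : ((r.foldl (fun d id => if d.contains id then d.insert id (d.getD id 0 + 1) else d)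
      (l.foldl (fun d id => if !(d.contains id) then d.insert id 0 else d)
        (PySem.Dict.empty : PySem.Dict Int Int)))).keys.Nodup := by
    rw [p2_keys]; exact hnd1
  rw [PySem.Dict.items_eq_map_keys _ hnd2 0, List.map_map, p2_keys, hkeys1]
  have hmap : ((PySem.Set.ofList l).map
        ((fun p => p.1 * p.2) ∘ fun k =>
          (k, (r.foldl (fun d id => if d.contains id then d.insert id (d.getD id 0 + 1) else d)
                (l.foldl (fun d id => if !(d.contains id) then d.insert id 0 else d)
                  (PySem.Dict.empty : PySem.Dict Int Int))).getD k 0)))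
      = (PySem.Set.ofList l).map (fun k => k * (r.count k : Int)) := by
    refine List.map_congr_left (fun k hk => ?_)
    have hc1 : (l.foldl (fun d id => if !(d.contains id) then d.insert id 0 else d)
        (PySem.Dict.empty : PySem.Dict Int Int)).contains k = true :=
      (PySem.Dict.contains_iff_mem_keys _ _).mpr (by rw [hkeys1]; exact hk)
    simp only [Function.comp_apply]
    rw [p2_getD _ _ _ hc1, p1_getD]
    simp
  rw [hmap, sum_count_eq_filter _ _ (PySem.Set.nodup_ofList l),
      foldl_if_add (fun x => PySem.Set.contains (PySem.Set.ofList l) x) r 0, zero_add]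
  refine congrArg List.sum (List.filter_congr (fun x _ => ?_))
  simp [PySem.Set.contains]
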